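-- pv_equiv track=rewrite | github.com/AdamZhouSE/pythonHomework | Code/CodeRecords/2535/60772/309804.py | execute
-- ===== SOURCE A (Python) =====
-- def execute(arr):
--     count = 0
--     Max = 0
--     for i, x in enumerate(arr):
--         Max = max(Max, x)
--         if Max == i:
--             count += 1
--     return count
-- ===== SOURCE B (Python) =====
-- def execute(arr):
--     # Brute force, stateless: for each index i recompute the zero-seeded
--     # prefix maximum from scratch over the slice, instead of carrying a running max.
--     return sum(1 for i in range(len(arr)) if max([0] + arr[:i+1]) == i)
-- ===== Notes on version B (the rewrite author's own statement) =====
-- stated objective: alternative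
-- what changed: B drops the running-max accumulator entirely: for each index i it recomputes the zero-seeded prefix maximum from scratch over the slice arr[:i+1] and counts the matches, a stateless nested-scan quadratic algorithm instead of A's single stateful linear pass.
import Mathlib
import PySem

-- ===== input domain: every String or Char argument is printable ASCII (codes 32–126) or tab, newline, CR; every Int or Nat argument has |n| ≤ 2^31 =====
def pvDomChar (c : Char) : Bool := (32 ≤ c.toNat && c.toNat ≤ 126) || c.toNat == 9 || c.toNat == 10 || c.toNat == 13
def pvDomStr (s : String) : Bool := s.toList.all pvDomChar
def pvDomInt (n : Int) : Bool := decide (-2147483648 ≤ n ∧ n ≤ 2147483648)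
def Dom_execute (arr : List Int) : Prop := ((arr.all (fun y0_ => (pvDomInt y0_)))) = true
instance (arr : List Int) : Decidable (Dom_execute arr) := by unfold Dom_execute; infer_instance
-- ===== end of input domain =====

-- B is stateless: it recomputes max([0] + arr[:i+1]) from scratch for each index i (nested scans),
-- instead of A's single pass carrying a running max (objective: alternative; B is not faster).

-- ===== PORT A =====
def execute (arr : List Int) : Int :=
  ((PySem.List.enumerate arr 0).foldl
    (fun st p =>
      let M := max st.2 p.2
      (if M = p.1 then st.1 + 1 else st.1, M))
    ((0 : Int), (0 : Int))).1

-- ===== PORT B =====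
-- sum(1 for i in range(len(arr)) if max([0] + arr[:i+1]) == i)
def execute_alt (arr : List Int) : Int :=
  (((PySem.List.pyRange 0 arr.length 1).countP
      (fun i =>
        PySem.List.max? ((0 : Int) :: PySem.List.slice arr (some 0) (some (i + 1))) (fun y => y)
          == some i)) : Nat)

-- ===== PRECONDITION & SPEC =====
def Spec_execute (arr : List Int) (out : Int) : Prop := out = execute_alt arr
instance (arr : List Int) (out : Int) : Decidable (Spec_execute arr out) := by unfold Spec_execute; infer_instance

-- ===== CLAIM (what is proved, stated in full; the proofs are below) =====
def Claim_equal_execute : Prop := ∀ (arr : List Int), Dom_execute arr → Spec_execute arr (execute arr)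

-- ===== LEMMAS AND PROOFS =====

-- A's fused loop, generalised over carried count, carried max and the enumerate offset,
-- characterised as a count over prefix maxima recomputed from scratch.
theorem execute_loop_eq (arr : List Int) (m c s : Int) :
    ((PySem.List.enumerate arr s).foldl
      (fun st p =>
        let M := max st.2 p.2
        (if M = p.1 then st.1 + 1 else st.1, M))
      (c, m)).1
    = c + ((List.range arr.length).countP
        (fun k => (arr.take (k + 1)).foldl max m = s + (k : Int)) : Nat) := by
  induction arr generalizing m c s with
  | nil => simp [PySem.List.enumerate_nil]
  | cons x xs ih =>
    simp only [PySem.List.enumerate_cons, List.foldl_cons]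
    rw [ih]
    rw [List.length_cons, List.range_succ_eq_map, List.countP_cons, List.countP_map]
    have hcnt : ∀ (M : Int),
        (List.range xs.length).countP
          ((fun k => decide ((xs.take k).foldl max M = s + (k : Int))) ∘ Nat.succ)
        = (List.range xs.length).countP
          (fun k => decide ((xs.take (k + 1)).foldl max M = s + 1 + (k : Int))) := by
      intro M
      apply List.countP_congr
      intro k _
      simp only [Function.comp_apply, Nat.succ_eq_add_one]
      have he : s + (((k + 1 : Nat)) : Int) = s + 1 + (k : Int) := by push_cast; ring
      rw [he]
    by_cases h : max m x = s
    · simp only [List.take_succ_cons, List.foldl_cons]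
      push_cast
      simp [h]
      rw [hcnt]
      ring
    · simp only [List.take_succ_cons, List.foldl_cons]
      push_cast
      simp [h]
      exact (hcnt (max m x)).symm

-- B's per-index predicate simplifies to the same prefix-maximum condition.
theorem execute_alt_eq (arr : List Int) :
    execute_alt arr
    = ((List.range arr.length).countP
        (fun k => (arr.take (k + 1)).foldl max 0 = (0 : Int) + (k : Int)) : Nat) := by
  unfold execute_alt
  rw [PySem.List.pyRange_one, List.countP_map]
  congr 1
  apply List.countP_congr
  intro k hk
  simp only [Function.comp]
  have hb : (0 : Int) + (k : Int) + 1 = ((k + 1 : Nat) : Int) := by push_cast; ring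
  rw [hb, PySem.List.slice_zero_start, PySem.List.slice_to_natCast,
    PySem.List.max?_id_cons]
  simp

-- ===== VERDICT (by name: the statement is the Claim_ definition above) =====
theorem execute_spec : Claim_equal_execute := by
  intro arr _
  unfold Spec_execute execute
  rw [execute_loop_eq, execute_alt_eq]
  simp
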